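-- pv_equiv track=rewrite | github.com/Andre-Grilo/FP_2425_PROJ1 | projeto1.py | obtem_posicao_inteiros
-- ===== SOURCE A (Python) =====
-- def obtem_posicao_inteiros(tab):
--     m = len(tab)        #Numero de linhas
--     n = len(tab[0])     #Numero de colunas
--     tuplo1 = ()
--     tuplo2= ()
--
--     for i in range(1,m*n+1):        # Preenche tuplo1 com inteiros de 1 ao total das posições
--         tuplo1 = tuplo1 + (i, )
--
--     for i in range(0, len(tuplo1), n):           # Organiza tuplo1 em grupos de "n" colunas
--         tuplo2 = tuplo2 + (tuplo1[i : i + n], )     # Adiciona uma linha de "n" colunas ao tuplo2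
--
--     #temos assim os numeros das posiçoes ex:((1,2,3,4),(5,6,7,8)...)
--     return tuplo2
-- ===== SOURCE B (Python) =====
-- def obtem_posicao_inteiros(tab):
--     m = len(tab)        # number of rows
--     n = len(tab[0])     # number of columns
--     # each position's number comes directly from its (row, column) coordinates
--     return tuple(tuple(i * n + j + 1 for j in range(n)) for i in range(m))
-- ===== Notes on version B (the rewrite author's own statement) =====
-- stated objective: faster
-- what changed: Instead of building a flat 1..m*n tuple by repeated tuple concatenation and then slicing it into rows, B computes each entry arithmetically from its (row,column) coordinates in one nested pass with no flat tuple and no slicing.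
import Mathlib
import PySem

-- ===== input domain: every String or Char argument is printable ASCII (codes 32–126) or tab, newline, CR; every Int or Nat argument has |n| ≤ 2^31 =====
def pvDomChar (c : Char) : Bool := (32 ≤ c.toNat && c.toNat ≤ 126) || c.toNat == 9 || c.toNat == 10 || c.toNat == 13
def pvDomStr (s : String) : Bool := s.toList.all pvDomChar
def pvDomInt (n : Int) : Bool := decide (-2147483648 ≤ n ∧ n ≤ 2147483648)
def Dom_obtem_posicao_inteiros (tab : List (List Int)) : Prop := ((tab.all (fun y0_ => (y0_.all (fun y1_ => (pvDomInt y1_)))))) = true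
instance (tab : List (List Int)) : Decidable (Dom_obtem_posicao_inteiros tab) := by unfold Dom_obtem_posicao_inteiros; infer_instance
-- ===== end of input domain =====

-- B numbers each grid cell arithmetically from its (row,column) coordinates instead of
-- concatenating a flat 1..m*n tuple and slicing it into rows (asymptotically faster in Python).

-- ===== PORT A =====
def obtem_posicao_inteiros (tab : List (List Int)) : List (List Int) :=
  let m : Int := tab.length
  let n : Int := ((PySem.List.pyGet? tab 0).getD []).length   -- tab[0]; Pre_ excludes empty tab (IndexError)
  let tuplo1 : List Int :=
    (PySem.List.pyRange 1 (m * n + 1) 1).foldl (fun acc i => acc ++ [i]) []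
  let tuplo2 : List (List Int) :=
    (PySem.List.pyRange 0 (tuplo1.length : Int) n).foldl
      (fun acc i => acc ++ [PySem.List.slice tuplo1 (some i) (some (i + n))]) []
  tuplo2

-- ===== PORT B =====
def obtem_posicao_inteiros_alt (tab : List (List Int)) : List (List Int) :=
  let m : Int := tab.length
  let n : Int := ((PySem.List.pyGet? tab 0).getD []).length   -- tab[0]; Pre_ excludes empty tab (IndexError)
  (PySem.List.pyRange 0 m).map (fun i => (PySem.List.pyRange 0 n).map (fun j => i * n + j + 1))

-- ===== PRECONDITION & SPEC =====
-- Pre_ excludes exactly the inputs where A raises: an empty tab (IndexError on tab[0])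
-- and a tab whose first row is empty (range step 0 → ValueError).
def Pre_obtem_posicao_inteiros (tab : List (List Int)) : Prop := tab ≠ [] ∧ tab.headD [] ≠ []
instance (tab : List (List Int)) : Decidable (Pre_obtem_posicao_inteiros tab) := by unfold Pre_obtem_posicao_inteiros; infer_instance
def pvWitness_obtem_posicao_inteiros : List (List Int) := [[1, 2], [3, 4]]

def Spec_obtem_posicao_inteiros (tab : List (List Int)) (out : List (List Int)) : Prop := out = obtem_posicao_inteiros_alt tab
instance (tab : List (List Int)) (out : List (List Int)) : Decidable (Spec_obtem_posicao_inteiros tab out) := by unfold Spec_obtem_posicao_inteiros; infer_instance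

-- ===== CLAIM (what is proved, stated in full; the proofs are below) =====
def Claim_equal_obtem_posicao_inteiros : Prop := ∀ (tab : List (List Int)), Dom_obtem_posicao_inteiros tab → Pre_obtem_posicao_inteiros tab → Spec_obtem_posicao_inteiros tab (obtem_posicao_inteiros tab)

-- ===== LEMMAS AND PROOFS =====

-- A's first loop: range(1, m*n+1) as an arithmetically indexed list.
theorem pv_rangeA (M N : Nat) (h : 0 < M * N) :
    PySem.List.pyRange 1 ((M : Int) * (N : Int) + 1) 1
      = (List.range (M * N)).map (fun k : Nat => 1 + 1 * (k : Int)) := by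
  rw [PySem.List.pyRange_of_pos _ _ (by norm_num)]
  have h1 : ((1 : Int) < (M : Int) * (N : Int) + 1) := by omega
  rw [if_pos h1]
  have h2 : (((M : Int) * (N : Int) + 1 - 1 + 1 - 1) / 1).toNat = M * N := by
    have e : ((M : Int) * (N : Int) + 1 - 1 + 1 - 1) / 1 = ((M * N : Nat) : Int) := by
      rw [Int.ediv_one]; push_cast; ring
    rw [e, Int.toNat_natCast]
  rw [h2]

-- A's second loop: range(0, m*n, n) hits exactly the m row starts.
theorem pv_rangeB (M N : Nat) (hN : 0 < N) :
    PySem.List.pyRange 0 ((M * N : Nat) : Int) (N : Int)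
      = (List.range M).map (fun k : Nat => 0 + (N : Int) * (k : Int)) := by
  rw [PySem.List.pyRange_of_pos _ _ (by exact_mod_cast hN)]
  by_cases hM : 0 < M * N
  · have h1 : ((0 : Int) < ((M * N : Nat) : Int)) := by exact_mod_cast hM
    rw [if_pos h1]
    have h2 : ((((M * N : Nat) : Int) - 0 + N - 1) / N).toNat = M := by
      have e : (((M * N : Nat) : Int) - 0 + N - 1) = ((N : Int) - 1) + (M : Int) * N := by push_cast; ring
      rw [e, Int.add_mul_ediv_right _ _ (by exact_mod_cast hN.ne')]
      rw [Int.ediv_eq_zero_of_lt (by omega) (by omega)]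
      simp
    rw [h2]
  · have hM0 : M = 0 := by
      rcases Nat.eq_zero_or_pos M with h0 | h0
      · exact h0
      · exact absurd (Nat.mul_pos h0 hN) hM
    subst hM0
    simp

-- Row k of A's slicing of the flat list equals B's arithmetic row.
theorem pv_row (M N k : Nat) (hk : k < M) :
    PySem.List.slice ((List.range (M * N)).map (fun k : Nat => 1 + 1 * (k : Int)))
        (some (0 + (N : Int) * (k : Int))) (some (0 + (N : Int) * (k : Int) + (N : Int)))
      = (List.range N).map (fun j : Nat => (k : Int) * (N : Int) + (j : Int) + 1) := by
  have e1 : (0 + (N : Int) * (k : Int)) = ((N * k : Nat) : Int) := by push_cast; ring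
  have e2 : (0 + (N : Int) * (k : Int) + (N : Int)) = ((N * k + N : Nat) : Int) := by push_cast; ring
  rw [e2, e1, PySem.List.slice_natCast]
  have hb : N * k + N ≤ M * N := by
    calc N * k + N = (k + 1) * N := by ring
    _ ≤ M * N := Nat.mul_le_mul_right N (Nat.succ_le_of_lt hk)
  apply List.ext_getElem
  · simp [List.length_take, List.length_drop]
    omega
  · intro i h1 h2
    simp only [List.getElem_take, List.getElem_drop, List.getElem_map, List.getElem_range]
    push_cast
    ring

-- ===== VERDICT (by name: the statement is the Claim_ definition above) =====
theorem obtem_posicao_inteiros_spec : Claim_equal_obtem_posicao_inteiros := by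
  intro tab _ hpre
  obtain ⟨hne, hrow⟩ := hpre
  cases tab with
  | nil => exact absurd rfl hne
  | cons r rs =>
    have hget : PySem.List.pyGet? (r :: rs) 0 = some r := by
      simp [PySem.List.pyGet?, PySem.List.pyIdx?]
    have hN : 0 < r.length := List.length_pos_iff.mpr (by simpa using hrow)
    show obtem_posicao_inteiros (r :: rs) = obtem_posicao_inteiros_alt (r :: rs)
    set M := rs.length + 1 with hM
    set N := r.length with hNdef
    have hMN : 0 < M * N := Nat.mul_pos (Nat.succ_pos _) hN
    simp only [obtem_posicao_inteiros, obtem_posicao_inteiros_alt, hget, Option.getD_some,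
      List.length_cons, PySem.List.foldl_append_singleton,
      PySem.List.foldl_append_singleton_eq_map, List.nil_append]
    rw [pv_rangeA M N hMN]
    rw [show (((List.range (M * N)).map (fun k : Nat => 1 + 1 * (k : Int))).length : Int)
          = ((M * N : Nat) : Int) by simp]
    rw [pv_rangeB M N hN]
    rw [PySem.List.pyRange_zero_natCast M, PySem.List.pyRange_zero_natCast N]
    simp only [List.map_map]
    apply List.map_congr_left
    intro k hkmem
    have hk : k < M := List.mem_range.mp hkmem
    simp only [Function.comp]
    rw [pv_row M N k hk]
    apply List.map_congr_left
    intro j _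
    simp only [Function.comp_apply]
    ring
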